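-- pv_equiv track=rewrite | github.com/ff0kk/FR-LTM | util.py | truncate_grids_pair
-- ===== SOURCE A (Python) =====
-- def truncate_grids_pair(grids_a, grids_b, max_len):
--     if len(grids_a) + len(grids_b) > max_len-3:
--         while len(grids_a) + len(grids_b) > max_len-3:
--             if len(grids_a) > len(grids_b):
--                 grids_a = grids_a[:-1]
--             else:
--                 grids_b = grids_b[:-1]
--     return grids_a, grids_b
-- ===== SOURCE B (Python) =====
-- def truncate_grids_pair(grids_a, grids_b, max_len):
--     t = max_len - 3
--     if len(grids_a) + len(grids_b) <= t:
--         return grids_a, grids_b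
--     fa = min(len(grids_a), max(t - len(grids_b), (t + 1) // 2))
--     return grids_a[:fa], grids_b[:t - fa]
-- ===== Notes on version B (the rewrite author's own statement) =====
-- stated objective: faster
-- what changed: Replaces the one-element-at-a-time trimming while-loop by a closed-form computation of the two final lengths (min/max arithmetic plus one halving) followed by a single slice of each list.
import Mathlib
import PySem

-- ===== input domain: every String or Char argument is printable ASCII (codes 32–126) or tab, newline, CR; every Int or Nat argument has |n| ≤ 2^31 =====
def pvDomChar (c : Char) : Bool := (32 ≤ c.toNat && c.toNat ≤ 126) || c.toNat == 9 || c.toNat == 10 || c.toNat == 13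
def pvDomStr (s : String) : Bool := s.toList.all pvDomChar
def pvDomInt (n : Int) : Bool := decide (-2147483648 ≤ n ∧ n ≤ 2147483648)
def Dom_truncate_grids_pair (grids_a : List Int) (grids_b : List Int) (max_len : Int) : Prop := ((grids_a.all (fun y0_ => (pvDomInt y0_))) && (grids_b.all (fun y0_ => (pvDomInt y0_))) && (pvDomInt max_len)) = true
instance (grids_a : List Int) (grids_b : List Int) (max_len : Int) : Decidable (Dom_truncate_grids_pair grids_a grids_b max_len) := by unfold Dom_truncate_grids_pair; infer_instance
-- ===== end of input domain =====

-- B replaces A's one-element-at-a-time trimming loop by computing the two final lengths in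
-- closed form and slicing each list once (objective: faster).

-- ===== PORT A =====
-- A's while loop, with fuel = initial combined length (enough for every terminating run,
-- i.e. whenever max_len ≥ 3; on max_len < 3 the Python loop never terminates — outside Pre_).
def pvLoopA : Nat → Int → List Int → List Int → List Int × List Int
  | 0, _, a, b => (a, b)
  | n + 1, t, a, b =>
    if (a.length : Int) + (b.length : Int) > t then
      if (a.length : Int) > (b.length : Int) then
        pvLoopA n t (PySem.List.slice a none (some (-1))) b
      else
        pvLoopA n t a (PySem.List.slice b none (some (-1)))
    else (a, b)

def truncate_grids_pair (grids_a : List Int) (grids_b : List Int) (max_len : Int) : List Int × List Int :=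
  if (grids_a.length : Int) + (grids_b.length : Int) > max_len - 3 then
    pvLoopA (grids_a.length + grids_b.length) (max_len - 3) grids_a grids_b
  else (grids_a, grids_b)

-- ===== PORT B =====
def truncate_grids_pair_alt (grids_a : List Int) (grids_b : List Int) (max_len : Int) : List Int × List Int :=
  let t := max_len - 3
  if (grids_a.length : Int) + (grids_b.length : Int) ≤ t then (grids_a, grids_b)
  else
    let fa := min (grids_a.length : Int) (max (t - (grids_b.length : Int)) (PySem.Int.floordiv (t + 1) 2))
    (PySem.List.slice grids_a none (some fa), PySem.List.slice grids_b none (some (t - fa)))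

-- ===== PRECONDITION & SPEC =====
-- Pre_ excludes exactly max_len < 3: there len(grids_a)+len(grids_b) ≥ 0 > max_len-3 always holds,
-- so A's while loop never terminates (A returns on no such input).
def Pre_truncate_grids_pair (grids_a : List Int) (grids_b : List Int) (max_len : Int) : Prop := 3 ≤ max_len
instance (grids_a : List Int) (grids_b : List Int) (max_len : Int) : Decidable (Pre_truncate_grids_pair grids_a grids_b max_len) := by unfold Pre_truncate_grids_pair; infer_instance

def pvWitness_truncate_grids_pair : List Int × List Int × Int := ([1, 2], [3], 5)

def Spec_truncate_grids_pair (grids_a : List Int) (grids_b : List Int) (max_len : Int) (out : List Int × List Int) : Prop := out = truncate_grids_pair_alt grids_a grids_b max_len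
instance (grids_a : List Int) (grids_b : List Int) (max_len : Int) (out : List Int × List Int) : Decidable (Spec_truncate_grids_pair grids_a grids_b max_len out) := by unfold Spec_truncate_grids_pair; infer_instance

-- ===== CLAIM (what is proved, stated in full; the proofs are below) =====
def Claim_equal_truncate_grids_pair : Prop := ∀ (grids_a : List Int) (grids_b : List Int) (max_len : Int), Dom_truncate_grids_pair grids_a grids_b max_len → Pre_truncate_grids_pair grids_a grids_b max_len → Spec_truncate_grids_pair grids_a grids_b max_len (truncate_grids_pair grids_a grids_b max_len)

-- ===== LEMMAS AND PROOFS =====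

-- The final a-length the loop reaches, as a closed form of the two lengths.
def pvFa (A B t : Int) : Int := min A (max (t - B) ((t + 1) / 2))

-- Loop characterisation: with enough fuel and 0 ≤ t, A's loop returns the closed-form prefixes.
theorem pvLoopA_eq (t : Int) (ht : 0 ≤ t) :
    ∀ (n : Nat) (a b : List Int), a.length + b.length ≤ n →
      pvLoopA n t a b =
        if (a.length : Int) + (b.length : Int) ≤ t then (a, b)
        else (a.take (pvFa a.length b.length t).toNat,
              b.take (t - pvFa a.length b.length t).toNat) := by
  intro n
  induction n with
  | zero =>
    intro a b hn
    have ha : a = [] := by cases a <;> simp_all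
    have hb : b = [] := by cases b <;> simp_all
    subst ha; subst hb
    simp [pvLoopA, ht]
  | succ n ih =>
    intro a b hn
    rw [show pvLoopA (n+1) t a b
        = (if (a.length : Int) + (b.length : Int) > t then
            if (a.length : Int) > (b.length : Int) then
              pvLoopA n t (PySem.List.slice a none (some (-1))) b
            else pvLoopA n t a (PySem.List.slice b none (some (-1)))
          else (a, b)) from rfl]
    by_cases hgt : (a.length : Int) + (b.length : Int) > t
    · rw [if_pos hgt, if_neg (by omega : ¬ (a.length : Int) + (b.length : Int) ≤ t)]
      rw [PySem.List.slice_to_neg_one, PySem.List.slice_to_neg_one]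
      by_cases hab : (a.length : Int) > (b.length : Int)
      · rw [if_pos hab]
        have hA1 : 1 ≤ a.length := by omega
        rw [List.dropLast_eq_take]
        have Ea : (a.take (a.length - 1)).length = a.length - 1 := by simp
        rw [ih (a.take (a.length - 1)) b (by rw [Ea]; omega), Ea]
        by_cases hstop : ((a.length - 1 : Nat) : Int) + (b.length : Int) ≤ t
        · -- loop ends right after this step: a.length + b.length = t + 1
          rw [if_pos hstop]
          have h1 : (pvFa a.length b.length t).toNat = a.length - 1 := by
            unfold pvFa; omega
          have h2 : (t - pvFa a.length b.length t).toNat = b.length := by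
            unfold pvFa; omega
          rw [h1, h2, List.take_length]
        · rw [if_neg hstop, List.take_take]
          have h0 : pvFa ((a.length - 1 : Nat)) b.length t = pvFa a.length b.length t := by
            unfold pvFa; omega
          rw [h0]
          have h1 : min (pvFa a.length b.length t).toNat (a.length - 1)
              = (pvFa a.length b.length t).toNat := by
            unfold pvFa; omega
          rw [h1]
      · rw [if_neg hab]
        have hB1 : 1 ≤ b.length := by omega
        rw [List.dropLast_eq_take]
        have Eb : (b.take (b.length - 1)).length = b.length - 1 := by simp
        rw [ih a (b.take (b.length - 1)) (by rw [Eb]; omega), Eb]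
        by_cases hstop : (a.length : Int) + ((b.length - 1 : Nat) : Int) ≤ t
        · -- loop ends right after this step: a.length + b.length = t + 1
          rw [if_pos hstop]
          have h1 : (pvFa a.length b.length t).toNat = a.length := by
            unfold pvFa; omega
          have h2 : (t - pvFa a.length b.length t).toNat = b.length - 1 := by
            unfold pvFa; omega
          rw [h1, h2, List.take_length]
        · rw [if_neg hstop, List.take_take]
          have h0 : pvFa a.length ((b.length - 1 : Nat)) t = pvFa a.length b.length t := by
            unfold pvFa; omega
          rw [h0]
          have h1 : min (t - pvFa a.length b.length t).toNat (b.length - 1)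
              = (t - pvFa a.length b.length t).toNat := by
            unfold pvFa; omega
          rw [h1]
    · rw [if_neg hgt, if_pos (by omega)]

-- ===== VERDICT (by name: the statement is the Claim_ definition above) =====
theorem truncate_grids_pair_spec : Claim_equal_truncate_grids_pair := by
  intro a b m _ hpre
  unfold Spec_truncate_grids_pair truncate_grids_pair truncate_grids_pair_alt
  dsimp only
  have ht : (0:Int) ≤ m - 3 := by exact_mod_cast sub_nonneg.mpr hpre
  rw [PySem.Int.floordiv_eq_ediv_of_pos (by norm_num)]
  by_cases hle : (a.length : Int) + (b.length : Int) ≤ m - 3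
  · rw [if_neg (by omega), if_pos hle]
  · rw [if_pos (by omega), if_neg hle]
    rw [pvLoopA_eq (m - 3) ht (a.length + b.length) a b (le_refl _), if_neg hle]
    rw [show min ((a.length : Int)) (max (m - 3 - (b.length : Int)) ((m - 3 + 1) / 2))
        = pvFa a.length b.length (m - 3) from rfl]
    have hfa0 : (0:Int) ≤ pvFa a.length b.length (m - 3) := by unfold pvFa; omega
    have hfb0 : (0:Int) ≤ (m - 3) - pvFa a.length b.length (m - 3) := by unfold pvFa; omega
    rw [PySem.List.slice_to a hfa0, PySem.List.slice_to b hfb0]
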